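-- pv_equiv track=rewrite | github.com/antocad/Sorbonne_Master_DAC | IAMSI/tme04/glucose-syrup-4.1/simp/projet_CADIOU_JOUVE.py | kparmi
-- ===== SOURCE A (Python) =====
-- def kparmi(liste,k):
--     res =[]
--     if (len(liste)<k):
--         return []
--     if (k==0):
--         return []
--     if (k==1):
--         return [str(-e) for e in liste]
--     for i in range(len(liste)):
--         res += [str(-liste[i])+' '+str(e) for e in kparmi(liste[i+1:],k-1)]
--     return res
-- ===== SOURCE B (Python) =====
-- import itertools
--
--
-- def kparmi(liste, k):
--     if k < 1 or len(liste) < k: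
--         return []
--     return [' '.join(str(-e) for e in combo)
--             for combo in itertools.combinations(liste, k)]
-- ===== Notes on version B (the rewrite author's own statement) =====
-- stated objective: idiomatic
-- what changed: B replaces A's three-guard recursion over list suffixes with string concatenation by a single guard plus itertools.combinations and a ' '.join formatting pass.
import Mathlib
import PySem

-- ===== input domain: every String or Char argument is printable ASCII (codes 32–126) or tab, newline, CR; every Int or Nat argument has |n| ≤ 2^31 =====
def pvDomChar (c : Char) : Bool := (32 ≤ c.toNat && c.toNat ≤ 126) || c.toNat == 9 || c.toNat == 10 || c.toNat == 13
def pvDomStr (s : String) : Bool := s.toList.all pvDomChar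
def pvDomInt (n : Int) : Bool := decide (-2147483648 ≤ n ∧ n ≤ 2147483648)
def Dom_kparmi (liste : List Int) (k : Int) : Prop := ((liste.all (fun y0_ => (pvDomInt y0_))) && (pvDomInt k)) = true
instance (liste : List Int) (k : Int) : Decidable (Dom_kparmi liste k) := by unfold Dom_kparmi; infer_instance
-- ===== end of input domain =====

-- B replaces A's recursion-over-suffixes with string concatenation by a guard plus a
-- combinations enumeration and a join formatting pass (idiomatic; same cost).


-- ===== PORT A =====
-- The 'for i in range(len(liste))' loop reads liste[i] and liste[i+1:]; it is transcribed
-- as kparmiLoop walking the suffixes of liste, building the same strings in the same order.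
mutual
def kparmi (liste : List Int) (k : Int) : List String :=
  if (liste.length : Int) < k then []
  else if k = 0 then []
  else if k = 1 then liste.map (fun e => PySem.Int.toStr (-e))
  else kparmiLoop liste k
  termination_by (liste.length, 1)

def kparmiLoop : List Int → Int → List String
  | [], _ => []
  | x :: rest, k =>
      (kparmi rest (k - 1)).map (fun e => PySem.Int.toStr (-x) ++ " " ++ e)
        ++ kparmiLoop rest k
  termination_by l _ => (l.length, 0)
end

-- ===== PORT B =====
-- itertools.combinations is ported as PySem.List.combinations (lexicographic order),
-- ' '.join as PySem.Str.join.
def kparmi_alt (liste : List Int) (k : Int) : List String :=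
  if k < 1 ∨ (liste.length : Int) < k then []
  else (PySem.List.combinations liste k.toNat).map
        (fun combo => PySem.Str.join " " (combo.map (fun e => PySem.Int.toStr (-e))))

-- ===== PRECONDITION & SPEC =====
def Spec_kparmi (liste : List Int) (k : Int) (out : List String) : Prop := out = kparmi_alt liste k
instance (liste : List Int) (k : Int) (out : List String) : Decidable (Spec_kparmi liste k out) := by unfold Spec_kparmi; infer_instance

-- ===== CLAIM (what is proved, stated in full; the proofs are below) =====
def Claim_equal_kparmi : Prop := ∀ (liste : List Int) (k : Int), Dom_kparmi liste k → Spec_kparmi liste k (kparmi liste k)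

-- ===== LEMMAS AND PROOFS =====

-- abbreviation used only by the proofs
def pvJoinF (c : List Int) : String :=
  PySem.Str.join " " (c.map (fun e => PySem.Int.toStr (-e)))

lemma pvJoinF_singleton (x : Int) : pvJoinF [x] = PySem.Int.toStr (-x) := by
  apply String.toList_inj.mp
  simp [pvJoinF, PySem.Str.join, PySem.Chars.join, List.intercalate]

lemma pvJoinF_cons (x : Int) (c : List Int) (hc : c ≠ []) :
    pvJoinF (x :: c) = PySem.Int.toStr (-x) ++ " " ++ pvJoinF c := by
  apply String.toList_inj.mp
  obtain ⟨y, c', rfl⟩ := List.exists_cons_of_ne_nil hc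
  simp [pvJoinF, PySem.Str.join, PySem.Chars.join_cons_cons]

lemma kparmiLoop_neg : ∀ (l : List Int) (k : Int), k < 0 → kparmiLoop l k = [] := by
  intro l
  induction l with
  | nil => intro k _; simp [kparmiLoop]
  | cons x rest ih =>
      intro k hk
      have h1 : kparmi rest (k - 1) = [] := by
        rw [kparmi]
        have : ¬ ((rest.length : Int) < k - 1) := by
          have : (0:Int) ≤ rest.length := by positivity
          omega
        simp only [this, if_false]
        have h0 : ¬ (k - 1 = 0) := by omega
        have h1' : ¬ (k - 1 = 1) := by omega
        simp only [h0, h1', if_false]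
        exact ih (k - 1) (by omega)
      rw [kparmiLoop, h1, ih k hk]
      simp

lemma kparmiLoop_short : ∀ (l : List Int) (k : Int), 2 ≤ k → (l.length : Int) < k → kparmiLoop l k = [] := by
  intro l
  induction l with
  | nil => intro k _ _; simp [kparmiLoop]
  | cons x rest ih =>
      intro k hk hlen
      have h1 : kparmi rest (k - 1) = [] := by
        rw [kparmi]
        have : (rest.length : Int) < k - 1 := by simp only [List.length_cons] at hlen; push_cast at hlen; omega
        simp [this]
      rw [kparmiLoop, h1, ih k hk (by simp only [List.length_cons] at hlen; push_cast at hlen; omega)]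
      simp

lemma kparmiLoop_eq_kparmi (l : List Int) (k : Int) (hk : 2 ≤ k) :
    kparmiLoop l k = kparmi l k := by
  by_cases h : (l.length : Int) < k
  · rw [kparmiLoop_short l k hk h, kparmi]; simp [h]
  · rw [kparmi]
    have h0 : ¬ (k = 0) := by omega
    have h1 : ¬ (k = 1) := by omega
    simp [h, h0, h1]

lemma kparmi_pos : ∀ (l : List Int) (k : Nat), 1 ≤ k →
    kparmi l (k : Int) = (PySem.List.combinations l k).map pvJoinF := by
  intro l
  induction l with
  | nil =>
      intro k hk
      obtain ⟨m, rfl⟩ := Nat.exists_eq_add_of_le hk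
      rw [kparmi]
      have : (([] : List Int).length : Int) < ((1 + m : Nat) : Int) := by
        simp only [List.length_nil]; push_cast; omega
      simp only [this, if_true]
      rw [show (1 + m) = m + 1 from by omega, PySem.List.combinations_nil_succ]
      simp
  | cons x rest ih =>
      intro k hk
      rcases Nat.lt_or_ge k 2 with hk1 | hk2
      · -- k = 1
        have hk1 : k = 1 := by omega
        subst hk1
        rw [kparmi]
        have hg : ¬ (((x :: rest).length : Int) < ((1:Nat):Int)) := by
          simp only [List.length_cons]; omega
        rw [if_neg hg, if_neg (by norm_num), if_pos (by norm_num),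
            PySem.List.combinations_one, List.map_map]
        apply List.map_congr_left
        intro a _
        simp [Function.comp, pvJoinF_singleton]
      · -- 2 ≤ k
        by_cases hlen : (((x :: rest).length : Int) < (k : Int))
        · rw [kparmi]
          simp only [hlen, if_true]
          rw [PySem.List.combinations_eq_nil_of_length_lt (x :: rest) (by exact_mod_cast hlen)]
          simp
        · rw [kparmi]
          have h0 : ¬ (((k:Nat) : Int) = 0) := by omega
          have h1 : ¬ (((k:Nat) : Int) = 1) := by omega
          simp only [hlen, h0, h1, if_false]
          rw [kparmiLoop]
          have hk1 : (k : Int) - 1 = ((k - 1 : Nat) : Int) := by omega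
          rw [hk1, ih (k - 1) (by omega), kparmiLoop_eq_kparmi rest (k : Int) (by exact_mod_cast hk2),
              ih k (by omega)]
          obtain ⟨r, rfl⟩ : ∃ r, k = r + 1 := ⟨k - 1, by omega⟩
          rw [PySem.List.combinations_cons_succ]
          rw [List.map_append, List.map_map, List.map_map]
          congr 1
          apply List.map_congr_left
          intro c hc
          have hlen_c : c.length = r := PySem.List.length_of_mem_combinations hc
          have hcne : c ≠ [] := by
            intro h; subst h; simp at hlen_c; omega
          simp only [Function.comp]
          rw [show r + 1 - 1 = r from by omega] at *
          rw [pvJoinF_cons x c hcne]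

lemma kparmi_nonpos (l : List Int) (k : Int) (hk : k < 1) : kparmi l k = [] := by
  rw [kparmi]
  have hg : ¬ ((l.length : Int) < k) := by
    have : (0:Int) ≤ l.length := by positivity
    omega
  rcases eq_or_lt_of_le (show k ≤ 0 by omega) with h0 | hneg
  · simp [hg, ← h0]
  · have h0 : ¬ (k = 0) := by omega
    have h1 : ¬ (k = 1) := by omega
    simp only [hg, h0, h1, if_false]
    exact kparmiLoop_neg l k (by omega)

-- ===== VERDICT (by name: the statement is the Claim_ definition above) =====
theorem kparmi_spec : Claim_equal_kparmi := by
  intro liste k _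
  unfold Spec_kparmi kparmi_alt
  by_cases hk : k < 1
  · rw [kparmi_nonpos liste k hk]
    simp [hk]
  · have hk : 1 ≤ k := by omega
    have hknat : k = ((k.toNat : Nat) : Int) := by omega
    have h1 : 1 ≤ k.toNat := by omega
    by_cases hlen : (liste.length : Int) < k
    · rw [hknat, kparmi_pos liste k.toNat h1,
          PySem.List.combinations_eq_nil_of_length_lt liste (by omega)]
      simp [hlen]
    · rw [hknat, kparmi_pos liste k.toNat h1]
      have : ¬ (((k.toNat : Nat) : Int) < 1 ∨ (liste.length : Int) < ((k.toNat : Nat) : Int)) := by omega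
      simp only [this, if_false]
      rfl
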